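-- pv_equiv track=rewrite | github.com/stepchoi-liquibit/glassnode_dist_pls_horseshoe | twlgbm_features.py | _build_feature_category_map
-- ===== SOURCE A (Python) =====
-- def _build_feature_category_map(
--     feature_cols: list[str],
--     col_to_category: dict[str, str],
-- ) -> dict[str, str]:
--     """
--     Map each feature column (including derived features like rolling stats)
--     to its source category.
--     """
--     result: dict[str, str] = {}
--     base_cols = sorted(col_to_category.keys(), key=len, reverse=True)
--
--     for feat in feature_cols:
--         if feat in col_to_category:
--             result[feat] = col_to_category[feat]
--             continue
--         for base in base_cols:
--             if feat.startswith(base + "_"):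
--                 result[feat] = col_to_category[base]
--                 break
--
--     return result
-- ===== SOURCE B (Python) =====
-- def _build_feature_category_map(
--     feature_cols: list[str],
--     col_to_category: dict[str, str],
-- ) -> dict[str, str]:
--     """
--     Map each feature column (including derived features like rolling stats)
--     to its source category.
--
--     Instead of scanning every base column per feature, try the feature's own
--     underscore-boundary prefixes, longest first, with a dict lookup each.
--     """
--     result: dict[str, str] = {}
--     for feat in feature_cols:
--         if feat in col_to_category:
--             result[feat] = col_to_category[feat]
--             continue
--         for i in range(len(feat) - 1, -1, -1):
--             if feat[i] == "_" and feat[:i] in col_to_category: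
--                 result[feat] = col_to_category[feat[:i]]
--                 break
--     return result
-- ===== Notes on version B (the rewrite author's own statement) =====
-- stated objective: faster
-- what changed: Instead of testing every base column (sorted by length) against each feature, B looks up each feature's own underscore-boundary prefixes in the dict, longest first, so per-feature work no longer scans all base columns.
import Mathlib
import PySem

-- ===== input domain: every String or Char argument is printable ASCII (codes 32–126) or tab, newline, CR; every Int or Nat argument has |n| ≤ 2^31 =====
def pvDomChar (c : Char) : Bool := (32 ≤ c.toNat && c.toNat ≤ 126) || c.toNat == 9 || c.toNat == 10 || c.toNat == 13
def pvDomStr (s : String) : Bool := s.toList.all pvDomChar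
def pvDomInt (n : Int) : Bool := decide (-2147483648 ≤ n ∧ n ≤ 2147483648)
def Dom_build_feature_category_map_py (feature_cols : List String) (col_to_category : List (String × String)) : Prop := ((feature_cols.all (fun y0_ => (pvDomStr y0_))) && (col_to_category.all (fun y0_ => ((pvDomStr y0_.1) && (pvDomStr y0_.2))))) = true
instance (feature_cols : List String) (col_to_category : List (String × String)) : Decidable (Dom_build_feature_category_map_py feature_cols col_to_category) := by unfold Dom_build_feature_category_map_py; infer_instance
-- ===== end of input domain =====

-- B replaces A's scan over all base columns per feature by dict lookups of the
-- feature's own underscore-boundary prefixes, longest first.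

-- ===== PORT A =====
-- strings are handled as their char lists (PySem.Chars is the exact model of Python str)
def build_feature_category_map_py (feature_cols : List String) (col_to_category : List (String × String)) : List (String × String) :=
  let d : PySem.Dict (List Char) String :=
    PySem.Dict.ofList (col_to_category.map (fun p => (p.1.toList, p.2)))
  let base_cols := PySem.List.sorted d.keys (fun b => b.length) true
  (feature_cols.foldl (fun result feat =>
      if d.contains feat.toList then
        result.insert feat (d.getD feat.toList "")
      else
        match base_cols.find? (fun base => PySem.Chars.startswith feat.toList (base ++ ['_'])) with
        | some base => result.insert feat (d.getD base "")
        | none => result)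
    PySem.Dict.empty).items

-- ===== PORT B =====
-- 'for i in range(len(feat)-1, -1, -1): if feat[i] == "_" and feat[:i] in d: return d[feat[:i]]'
def bfcmScan (d : PySem.Dict (List Char) String) (cs : List Char) : Nat → Option String
  | 0 => none
  | n + 1 =>
    if cs[n]? == some '_' then
      match d.get? (cs.take n) with
      | some v => some v
      | none => bfcmScan d cs n
    else bfcmScan d cs n

def build_feature_category_map_py_alt (feature_cols : List String) (col_to_category : List (String × String)) : List (String × String) :=
  let d : PySem.Dict (List Char) String :=
    PySem.Dict.ofList (col_to_category.map (fun p => (p.1.toList, p.2)))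
  (feature_cols.foldl (fun result feat =>
      match d.get? feat.toList with
      | some v => result.insert feat v
      | none =>
        match bfcmScan d feat.toList feat.toList.length with
        | some v => result.insert feat v
        | none => result)
    PySem.Dict.empty).items

-- ===== PRECONDITION & SPEC =====
def Spec_build_feature_category_map_py (feature_cols : List String) (col_to_category : List (String × String)) (out : List (String × String)) : Prop := out = build_feature_category_map_py_alt feature_cols col_to_category
instance (feature_cols : List String) (col_to_category : List (String × String)) (out : List (String × String)) : Decidable (Spec_build_feature_category_map_py feature_cols col_to_category out) := by unfold Spec_build_feature_category_map_py; infer_instance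

-- ===== CLAIM (what is proved, stated in full; the proofs are below) =====
def Claim_equal_build_feature_category_map_py : Prop := ∀ (feature_cols : List String) (col_to_category : List (String × String)), Dom_build_feature_category_map_py feature_cols col_to_category → Spec_build_feature_category_map_py feature_cols col_to_category (build_feature_category_map_py feature_cols col_to_category)

-- ===== LEMMAS AND PROOFS =====

-- 'feat.startswith(base + "_")' unpacked: base is the prefix of cs of its own
-- length, and the char right after it is '_'.
lemma bfcm_startswith_iff (cs b : List Char) :
    PySem.Chars.startswith cs (b ++ ['_']) = true ↔
      b.length < cs.length ∧ cs.take b.length = b ∧ cs[b.length]? = some '_' := by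
  rw [PySem.Chars.startswith_iff]
  constructor
  · intro h
    have hlen : b.length + 1 ≤ cs.length := by simpa using h.length_le
    obtain ⟨t, ht⟩ := h
    refine ⟨by omega, ?_, ?_⟩
    · rw [← ht, List.append_assoc, List.take_left]
    · rw [← ht, List.append_assoc]
      simp
  · rintro ⟨hlt, htake, hget⟩
    refine ⟨cs.drop (b.length + 1), ?_⟩
    have hdrop : cs.drop b.length = '_' :: cs.drop (b.length + 1) := by
      have hcons := List.drop_eq_getElem_cons (l := cs) (i := b.length) hlt
      rw [hcons]
      have : cs[b.length] = '_' := by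
        have := List.getElem?_eq_getElem (l := cs) (i := b.length) hlt
        rw [this] at hget; exact Option.some.inj hget
      rw [this]
    calc b ++ ['_'] ++ cs.drop (b.length + 1) = b ++ ('_' :: cs.drop (b.length + 1)) := by simp
      _ = cs.take b.length ++ cs.drop b.length := by rw [htake, hdrop]
      _ = cs := List.take_append_drop _ _

-- B's descending scan finds nothing iff no underscore-boundary prefix below n is a key
lemma bfcmScan_eq_none_iff (d : PySem.Dict (List Char) String) (cs : List Char) (n : Nat) :
    bfcmScan d cs n = none ↔
      ∀ i < n, cs[i]? = some '_' → d.get? (cs.take i) = none := by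
  induction n with
  | zero => simp [bfcmScan]
  | succ n ih =>
    simp only [bfcmScan]
    by_cases hu : cs[n]? = some '_'
    · simp only [hu, beq_self_eq_true, if_true]
      cases hg : d.get? (cs.take n) with
      | some v =>
        simp only [reduceCtorEq, false_iff, not_forall]
        exact ⟨n, Nat.lt_succ_self n, hu, by simp [hg]⟩
      | none =>
        rw [ih]
        constructor
        · intro h i hi hui
          rcases Nat.lt_succ_iff_lt_or_eq.mp hi with h' | rfl
          · exact h i h' hui
          · exact hg
        · intro h i hi hui
          exact h i (Nat.lt_succ_of_lt hi) hui
    · have hb : (cs[n]? == some '_') = false := by simpa using hu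
      rw [hb, if_neg (by simp), ih]
      constructor
      · intro h i hi hui
        rcases Nat.lt_succ_iff_lt_or_eq.mp hi with h' | rfl
        · exact h i h' hui
        · exact absurd hui hu
      · intro h i hi hui
        exact h i (Nat.lt_succ_of_lt hi) hui

-- B's descending scan returns the lookup at the LARGEST underscore boundary that is a key
lemma bfcmScan_eq_some (d : PySem.Dict (List Char) String) (cs : List Char) (n i : Nat)
    (hin : i < n) (hu : cs[i]? = some '_') (hv : (d.get? (cs.take i)).isSome)
    (hmax : ∀ j, i < j → j < n → cs[j]? = some '_' → d.get? (cs.take j) = none) :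
    bfcmScan d cs n = d.get? (cs.take i) := by
  induction n with
  | zero => omega
  | succ n ih =>
    simp only [bfcmScan]
    rcases Nat.lt_succ_iff_lt_or_eq.mp hin with h' | rfl
    · have hrec : bfcmScan d cs n = d.get? (cs.take i) :=
        ih h' (fun j hj hjn => hmax j hj (Nat.lt_succ_of_lt hjn))
      by_cases hun : cs[n]? = some '_'
      · have hgn : d.get? (cs.take n) = none := hmax n h' (Nat.lt_succ_self n) hun
        simp [hun, hgn, hrec]
      · have hb : (cs[n]? == some '_') = false := by simpa using hun
        simp [hb, hrec]
    · simp only [hu, beq_self_eq_true, if_true]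
      cases hg : d.get? (cs.take i) with
      | some v => rfl
      | none => rw [hg] at hv; simp at hv

-- a non-none lookup at an underscore-boundary prefix means that prefix is a key matching A's test
lemma bfcm_prefix_key (d : PySem.Dict (List Char) String) (cs : List Char) (i : Nat)
    (hi : i < cs.length) (hu : cs[i]? = some '_') (hne : d.get? (cs.take i) ≠ none) :
    cs.take i ∈ d.keys ∧ PySem.Chars.startswith cs (cs.take i ++ ['_']) = true := by
  have hlen : (cs.take i).length = i := by simp [List.length_take]; omega
  constructor
  · rw [← PySem.Dict.contains_iff_mem_keys, PySem.Dict.contains_eq_isSome_get?,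
      Option.isSome_iff_ne_none]
    exact hne
  · rw [bfcm_startswith_iff]
    refine ⟨by omega, by rw [hlen], by rw [hlen]; exact hu⟩

-- the per-feature bodies agree: A's first match in the length-descending key list
-- is B's longest underscore-boundary prefix hit
lemma bfcm_step_eq (d : PySem.Dict (List Char) String) (cs : List Char) :
    (match (PySem.List.sorted d.keys (fun b => b.length) true).find?
        (fun base => PySem.Chars.startswith cs (base ++ ['_'])) with
     | some base => some (d.getD base "")
     | none => none) = bfcmScan d cs cs.length := by
  have hperm := PySem.List.sorted_perm d.keys (fun b => b.length) true
  have hpw := PySem.List.sorted_pairwise_rev d.keys (fun b => b.length)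
  cases hfind : (PySem.List.sorted d.keys (fun b => b.length) true).find?
      (fun base => PySem.Chars.startswith cs (base ++ ['_'])) with
  | none =>
    simp only
    symm
    rw [bfcmScan_eq_none_iff]
    intro i hi hu
    by_contra hne
    obtain ⟨hmem, hsw⟩ := bfcm_prefix_key d cs i hi hu hne
    have hmemS := hperm.mem_iff.mpr hmem
    exact absurd hsw (List.find?_eq_none.mp hfind _ hmemS)
  | some base =>
    have hp := List.find?_some hfind
    obtain ⟨hlt, htake, hund⟩ := (bfcm_startswith_iff cs base).mp hp
    have hbk : base ∈ d.keys := hperm.mem_iff.mp (List.mem_of_find?_eq_some hfind)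
    have hcont : d.contains base = true := (PySem.Dict.contains_iff_mem_keys d base).mpr hbk
    have hsome : (d.get? base).isSome := by
      rw [← PySem.Dict.contains_eq_isSome_get?]; exact hcont
    obtain ⟨-, pre, post, hsplit, hpre⟩ := List.find?_eq_some_iff_append.mp hfind
    have hmax : ∀ j, base.length < j → j < cs.length → cs[j]? = some '_' →
        d.get? (cs.take j) = none := by
      intro j hj hjl hu
      by_contra hne
      obtain ⟨hmem, hsw⟩ := bfcm_prefix_key d cs j hjl hu hne
      have hlenj : (cs.take j).length = j := by simp [List.length_take]; omega
      have hmemS := hperm.mem_iff.mpr hmem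
      rw [hsplit] at hmemS
      rcases List.mem_append.mp hmemS with hin | hin
      · exact absurd hsw (by simpa using hpre _ hin)
      · rcases List.mem_cons.mp hin with heq | hin
        · rw [heq] at hlenj; omega
        · have hpw' : List.Pairwise (fun a b => b.length ≤ a.length) (pre ++ base :: post) := by
            rw [← hsplit]; exact hpw
          have hle := (List.pairwise_cons.mp (List.pairwise_append.mp hpw').2.1).1
            (cs.take j) hin
          rw [hlenj] at hle
          omega
    have hv : (d.get? (cs.take base.length)).isSome := by rw [htake]; exact hsome
    have heq := bfcmScan_eq_some d cs cs.length base.length hlt hund hv hmax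
    obtain ⟨v, hgv⟩ := Option.isSome_iff_exists.mp hsome
    simp only [heq, htake, hgv, PySem.Dict.getD_of_get?_eq_some d "" hgv]

-- ===== VERDICT (by name: the statement is the Claim_ definition above) =====
theorem build_feature_category_map_py_spec : Claim_equal_build_feature_category_map_py := by
  intro feature_cols col_to_category _
  unfold Spec_build_feature_category_map_py build_feature_category_map_py
    build_feature_category_map_py_alt
  apply congrArg PySem.Dict.items
  apply PySem.List.foldl_congr_mem
  intro acc feat _
  set d : PySem.Dict (List Char) String :=
    PySem.Dict.ofList (col_to_category.map (fun p => (p.1.toList, p.2))) with hd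
  rw [PySem.Dict.contains_eq_isSome_get?]
  cases hg : d.get? feat.toList with
  | some v => simp [PySem.Dict.getD_of_get?_eq_some d "" hg]
  | none =>
    simp only [Option.isSome_none, Bool.false_eq_true, if_false]
    have hstep := bfcm_step_eq d feat.toList
    cases hf : (PySem.List.sorted d.keys (fun b => b.length) true).find?
        (fun base => PySem.Chars.startswith feat.toList (base ++ ['_'])) with
    | none => rw [hf] at hstep; simp only at hstep; rw [← hstep]
    | some base => rw [hf] at hstep; simp only at hstep; rw [← hstep]
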